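-- pv_equiv track=rewrite | github.com/OllieOA/advent_of_code_2021 | day07/day07.py | calc_fuel_constant
-- ===== SOURCE A (Python) =====
-- def calc_fuel_constant(initial_pos, desired_spot):
--     pos_count = dict()
--     for i in initial_pos:
--         pos_count[i] = pos_count.get(i, 0) + 1
--
--     fuel_spent = 0
--     for key, val in pos_count.items():
--         fuel_spent += abs(key - desired_spot) * val
--
--     return fuel_spent
-- ===== SOURCE B (Python) =====
-- def calc_fuel_constant(initial_pos, desired_spot):
--     return sum(abs(i - desired_spot) for i in initial_pos)
-- ===== Notes on version B (the rewrite author's own statement) =====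
-- stated objective: simpler
-- what changed: B drops the frequency dict entirely and sums abs(i - desired_spot) directly in one pass over the raw positions, instead of grouping into a count dict and iterating its unique keys weighted by counts.
import Mathlib
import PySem

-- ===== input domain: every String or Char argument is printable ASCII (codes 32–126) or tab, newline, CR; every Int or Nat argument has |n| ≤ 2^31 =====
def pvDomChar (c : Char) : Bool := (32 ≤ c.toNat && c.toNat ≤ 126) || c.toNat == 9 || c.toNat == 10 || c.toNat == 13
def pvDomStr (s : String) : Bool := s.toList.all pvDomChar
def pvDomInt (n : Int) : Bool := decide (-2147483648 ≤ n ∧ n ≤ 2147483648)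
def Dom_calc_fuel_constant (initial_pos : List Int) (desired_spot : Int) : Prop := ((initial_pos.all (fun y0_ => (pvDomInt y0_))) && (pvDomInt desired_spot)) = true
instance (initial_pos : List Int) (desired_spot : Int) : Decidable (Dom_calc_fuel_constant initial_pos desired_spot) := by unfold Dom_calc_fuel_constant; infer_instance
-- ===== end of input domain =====

-- B drops the frequency dict and sums |i - desired_spot| in one pass over the raw positions (simpler decomposition).

-- ===== PORT A =====
-- pos_count[i] = pos_count.get(i, 0) + 1 over initial_pos, then sum |key - desired_spot| * val over items
def calc_fuel_constant (initial_pos : List Int) (desired_spot : Int) : Int :=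
  let pos_count : PySem.Dict Int Int :=
    initial_pos.foldl (fun d i => d.insert i (d.getD i 0 + 1)) PySem.Dict.empty
  pos_count.items.foldl (fun fuel_spent kv => fuel_spent + |kv.1 - desired_spot| * kv.2) 0

-- ===== PORT B =====
-- sum(abs(i - desired_spot) for i in initial_pos)
def calc_fuel_constant_alt (initial_pos : List Int) (desired_spot : Int) : Int :=
  (initial_pos.map (fun i => |i - desired_spot|)).sum

-- ===== PRECONDITION & SPEC =====
def Spec_calc_fuel_constant (initial_pos : List Int) (desired_spot : Int) (out : Int) : Prop := out = calc_fuel_constant_alt initial_pos desired_spot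
instance (initial_pos : List Int) (desired_spot : Int) (out : Int) : Decidable (Spec_calc_fuel_constant initial_pos desired_spot out) := by unfold Spec_calc_fuel_constant; infer_instance

-- ===== CLAIM (what is proved, stated in full; the proofs are below) =====
def Claim_equal_calc_fuel_constant : Prop := ∀ (initial_pos : List Int) (desired_spot : Int), Dom_calc_fuel_constant initial_pos desired_spot → Spec_calc_fuel_constant initial_pos desired_spot (calc_fuel_constant initial_pos desired_spot)

-- ===== LEMMAS AND PROOFS =====

-- summing f over the deduplicated keys weighted by multiplicity equals summing f over the raw list
theorem sum_dedup_count (xs : List Int) (f : Int → Int) :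
    ((PySem.Set.ofList xs).map (fun k => f k * (xs.count k : Int))).sum = (xs.map f).sum := by
  rw [Finset.sum_list_map_count xs f]
  have hnd : (PySem.Set.ofList xs).Nodup := PySem.Set.nodup_ofList xs
  have htf : (PySem.Set.ofList xs).toFinset = xs.toFinset := by
    apply Finset.ext
    intro a
    simp [PySem.Set.mem_ofList]
  rw [← htf, ← List.sum_toFinset _ hnd]
  apply Finset.sum_congr rfl
  intro k _
  rw [nsmul_eq_mul]
  ring

theorem foldl_add_abs (l : List (Int × Int)) (d : Int) (acc : Int) :
    l.foldl (fun fuel_spent kv => fuel_spent + |kv.1 - d| * kv.2) acc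
      = acc + (l.map (fun kv => |kv.1 - d| * kv.2)).sum := by
  induction l generalizing acc with
  | nil => simp
  | cons p t ih => simp [List.foldl_cons, ih]; ring

-- ===== VERDICT (by name: the statement is the Claim_ definition above) =====
theorem calc_fuel_constant_spec : Claim_equal_calc_fuel_constant := by
  intro initial_pos desired_spot _
  unfold Spec_calc_fuel_constant calc_fuel_constant calc_fuel_constant_alt
  simp only [PySem.Dict.foldl_insert_getD_add_one_eq_counter, PySem.Dict.items_counter,
    foldl_add_abs, List.map_map, Function.comp_def, zero_add]
  exact sum_dedup_count initial_pos (fun k => |k - desired_spot|)
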